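-- pv_equiv track=rewrite | github.com/kat-dearstyne/traceability-toolbox | toolbox/util/dict_util.py | joining
-- ===== SOURCE A (Python) =====
-- from typing import Any, Callable, Dict, Iterable, List, Set, Tuple, Type, TypeVar, Union
--
-- def joining(list_of_dicts: List[Dict]) -> Dict:
--     """
--     Aggregates the values of dictionaries.
--     :param list_of_dicts: The list of dictionaries to overlap.
--     :return: Single dictionary with aggregated values.
--     """
--     global_dict = {}
--
--     for d in list_of_dicts:
--         for k, v in d.items():
--             if k in global_dict:
--                 global_dict[k] += v
--             else:
--                 global_dict[k] = v
--
--     return global_dict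
-- ===== SOURCE B (Python) =====
-- def joining(list_of_dicts):
--     """
--     Aggregates the values of dictionaries.
--     :param list_of_dicts: The list of dictionaries to overlap.
--     :return: Single dictionary with aggregated values.
--     """
--     groups = {}
--     for d in list_of_dicts:
--         for k, v in d.items():
--             groups.setdefault(k, []).append(v)
--     result = {}
--     for k, vals in groups.items():
--         acc = vals[0]
--         for v in vals[1:]:
--             acc += v
--         result[k] = acc
--     return result
-- ===== Notes on version B (the rewrite author's own statement) =====
-- stated objective: alternative
-- what changed: B is a two-pass map-reduce: it first groups each key's values into lists (setdefault/append) preserving first-seen order, then reduces each group with an explicit left fold, instead of A's single pass that accumulates sums in place.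
import Mathlib
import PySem

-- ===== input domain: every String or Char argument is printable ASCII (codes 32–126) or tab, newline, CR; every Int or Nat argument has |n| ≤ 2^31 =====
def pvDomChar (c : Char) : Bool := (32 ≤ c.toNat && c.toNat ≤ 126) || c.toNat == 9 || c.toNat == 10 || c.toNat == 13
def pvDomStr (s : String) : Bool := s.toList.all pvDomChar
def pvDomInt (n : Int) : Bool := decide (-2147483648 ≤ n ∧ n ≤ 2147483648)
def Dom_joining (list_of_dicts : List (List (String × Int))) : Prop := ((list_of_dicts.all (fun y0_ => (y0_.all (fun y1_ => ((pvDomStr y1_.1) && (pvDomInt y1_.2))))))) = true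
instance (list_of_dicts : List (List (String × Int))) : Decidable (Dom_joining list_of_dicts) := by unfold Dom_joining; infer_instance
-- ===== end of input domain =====

-- B aggregates by a grouping pass (key → list of values) followed by an explicit reduce per
-- group, instead of A's in-place accumulation; same cost, a different decomposition.
-- Equivalence is about the RETURN value; on the Int value domain here neither version
-- observably mutates its argument.

-- ===== PORT A =====
-- global_dict = {}; for d in list_of_dicts: for k, v in d.items():
--   if k in global_dict: global_dict[k] += v else: global_dict[k] = v
def joining (list_of_dicts : List (List (String × Int))) : List (String × Int) :=
  (list_of_dicts.foldl
    (fun g d => d.foldl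
      (fun g kv =>
        if g.contains kv.1 then g.insert kv.1 (g.getD kv.1 0 + kv.2)
        else g.insert kv.1 kv.2)
      g)
    (PySem.Dict.empty : PySem.Dict String Int)).items

-- ===== PORT B =====
-- acc = vals[0]; for v in vals[1:]: acc += v   (vals is nonempty in B; [] arm is unreachable)
def joiningReduce (vals : List Int) : Int :=
  match vals with
  | [] => 0
  | v :: rest => rest.foldl (· + ·) v

-- groups.setdefault(k, []).append(v)  ≡  groups[k] = groups.get(k, []) + [v]  (Dict.modify)
def joining_alt (list_of_dicts : List (List (String × Int))) : List (String × Int) :=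
  let groups := list_of_dicts.foldl
    (fun g d => d.foldl
      (fun g kv => g.modify kv.1 [] (fun vs => vs ++ [kv.2]))
      g)
    (PySem.Dict.empty : PySem.Dict String (List Int))
  groups.items.map (fun kv => (kv.1, joiningReduce kv.2))

-- ===== PRECONDITION & SPEC =====
def Spec_joining (list_of_dicts : List (List (String × Int))) (out : List (String × Int)) : Prop := out = joining_alt list_of_dicts
instance (list_of_dicts : List (List (String × Int))) (out : List (String × Int)) : Decidable (Spec_joining list_of_dicts out) := by unfold Spec_joining; infer_instance

-- ===== CLAIM (what is proved, stated in full; the proofs are below) =====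
def Claim_equal_joining : Prop := ∀ (list_of_dicts : List (List (String × Int))), Dom_joining list_of_dicts → Spec_joining list_of_dicts (joining list_of_dicts)

-- ===== LEMMAS AND PROOFS =====

-- one A-step / one B-step over a single (key, value) pair
def jStepA (g : PySem.Dict String Int) (kv : String × Int) : PySem.Dict String Int :=
  if g.contains kv.1 then g.insert kv.1 (g.getD kv.1 0 + kv.2) else g.insert kv.1 kv.2

def jStepB (g : PySem.Dict String (List Int)) (kv : String × Int) : PySem.Dict String (List Int) :=
  g.modify kv.1 [] (fun vs => vs ++ [kv.2])

-- the invariant relating A's accumulator to B's groups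
def jRel (g : PySem.Dict String Int) (h : PySem.Dict String (List Int)) : Prop :=
  g.items = h.items.map (fun kv => (kv.1, joiningReduce kv.2)) ∧ h.keys.Nodup

theorem jReduce_append (vals : List Int) (v : Int) :
    joiningReduce (vals ++ [v]) = joiningReduce vals + v := by
  cases vals with
  | nil => simp [joiningReduce]
  | cons x xs => simp [joiningReduce, List.foldl_append]

theorem jRel_keys {g : PySem.Dict String Int} {h : PySem.Dict String (List Int)}
    (hr : jRel g h) : g.keys = h.keys := by
  obtain ⟨hi, _⟩ := hr
  simp only [PySem.Dict.keys, hi, List.map_map]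
  rfl

theorem jRel_step {g : PySem.Dict String Int} {h : PySem.Dict String (List Int)}
    (hr : jRel g h) (kv : String × Int) : jRel (jStepA g kv) (jStepB h kv) := by
  obtain ⟨hi, hnd⟩ := hr
  have hk : g.keys = h.keys := jRel_keys ⟨hi, hnd⟩
  have hgnd : g.keys.Nodup := hk ▸ hnd
  have hc : g.contains kv.1 = h.contains kv.1 := by
    rw [PySem.Dict.contains_eq_decide_mem_keys, PySem.Dict.contains_eq_decide_mem_keys, hk]
  by_cases hcon : h.contains kv.1 = true
  · -- key present: both replace in place
    have hcg : g.contains kv.1 = true := by rw [hc]; exact hcon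
    obtain ⟨vals, hmem⟩ : ∃ vals, (kv.1, vals) ∈ h.items := by
      have hs : (h.get? kv.1).isSome = true := by
        rw [← PySem.Dict.contains_eq_isSome_get?]; exact hcon
      rcases Option.isSome_iff_exists.mp hs with ⟨vals, hv⟩
      exact ⟨vals, (PySem.Dict.get?_eq_some_iff_mem_items h kv.1 vals hnd).mp hv⟩
    have hgmem : (kv.1, joiningReduce vals) ∈ g.items := by
      rw [hi]; exact List.mem_map_of_mem hmem
    have hgval : g.getD kv.1 0 = joiningReduce vals :=
      PySem.Dict.getD_of_mem_items g hgmem hgnd 0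
    have hhval : h.getD kv.1 [] = vals :=
      PySem.Dict.getD_of_mem_items h hmem hnd []
    constructor
    · show (jStepA g kv).items = _
      simp only [jStepA, jStepB, PySem.Dict.modify, hcg, if_pos,
        PySem.Dict.items_insert_of_contains _ _ hcg,
        PySem.Dict.items_insert_of_contains _ _ hcon, hi, List.map_map]
      apply List.map_congr_left
      intro p _
      by_cases hpk : p.1 = kv.1
      · simp [Function.comp, hpk, hgval, hhval, jReduce_append]
      · simp [Function.comp, hpk]
    · show (jStepB h kv).keys.Nodup
      have hkeq : (jStepB h kv).keys = h.keys := by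
        simp only [jStepB, PySem.Dict.modify, PySem.Dict.keys,
          PySem.Dict.items_insert_of_contains _ _ hcon, List.map_map]
        apply List.map_congr_left
        intro p _
        by_cases hpk : p.1 = kv.1
        · simp [Function.comp, hpk]
        · simp [Function.comp, hpk]
      rw [hkeq]; exact hnd
  · -- fresh key: both append
    have hcon' : h.contains kv.1 = false := by simpa using hcon
    have hcg : g.contains kv.1 = false := by rw [hc]; exact hcon'
    have hnk : kv.1 ∉ h.keys := by
      rw [PySem.Dict.contains_eq_decide_mem_keys] at hcon'
      simpa using hcon'
    constructor
    · show (jStepA g kv).items = _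
      simp only [jStepA, jStepB, PySem.Dict.modify, hcg,
        PySem.Dict.items_insert_of_not_contains _ _ hcg,
        PySem.Dict.items_insert_of_not_contains _ _ hcon', hi, List.map_append,
        PySem.Dict.getD_of_not_contains _ _ hcon', Bool.false_eq_true, if_false]
      simp [joiningReduce]
    · show (jStepB h kv).keys.Nodup
      have hkeq : (jStepB h kv).keys = h.keys ++ [kv.1] := by
        simp only [jStepB, PySem.Dict.modify, PySem.Dict.keys,
          PySem.Dict.items_insert_of_not_contains _ _ hcon', List.map_append]
        rfl
      rw [hkeq, List.nodup_append]
      refine ⟨hnd, by simp, ?_⟩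
      intro a ha b hb
      simp only [List.mem_singleton] at hb
      subst hb
      exact fun he => hnk (he ▸ ha)

theorem jRel_foldl (pairs : List (String × Int))
    {g : PySem.Dict String Int} {h : PySem.Dict String (List Int)} (hr : jRel g h) :
    jRel (pairs.foldl jStepA g) (pairs.foldl jStepB h) := by
  induction pairs generalizing g h with
  | nil => exact hr
  | cons kv rest ih => exact ih (jRel_step hr kv)

-- ===== VERDICT (by name: the statement is the Claim_ definition above) =====
theorem joining_spec : Claim_equal_joining := by
  intro l _
  show joining l = joining_alt l
  have hflatA : joining l = (l.flatten.foldl jStepA PySem.Dict.empty).items := by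
    simp only [joining, List.foldl_flatten]; rfl
  have hflatB : joining_alt l =
      (l.flatten.foldl jStepB PySem.Dict.empty).items.map
        (fun kv => (kv.1, joiningReduce kv.2)) := by
    simp only [joining_alt, List.foldl_flatten]; rfl
  have hrel : jRel (l.flatten.foldl jStepA PySem.Dict.empty)
      (l.flatten.foldl jStepB PySem.Dict.empty) :=
    jRel_foldl l.flatten ⟨by simp [PySem.Dict.empty], by simp [PySem.Dict.empty, PySem.Dict.keys]⟩
  rw [hflatA, hflatB, hrel.1]
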